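-- pv_equiv track=rewrite | github.com/CMU-IDS-2020/fp_conversation_dynamics | textProcessing/lsm.py | makeWordListsByActor
-- ===== SOURCE A (Python) =====
-- actor1 = "Niklas_Maak"
--
-- actor2 = "Tony_Fadell"
--
-- actor3 = "Rem_Koolhaas"
--
-- def makeWordListsByActor(words):
--     wordList1 = []
--     wordList2 = []
--     wordList3 = []
--     actor1_On = False
--     actor2_On = False
--     actor3_On = False
--
--     for word in words:
--         ## Capturing actors' name in the corpus
--         if word[0] == actor1:
--             actor1_On = True
--             actor2_On = False
--             actor3_On = False
--         elif word[0] == actor2: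
--             actor1_On = False
--             actor2_On = True
--             actor3_On = False
--         elif word[0] == actor3:
--             actor1_On = False
--             actor2_On = False
--             actor3_On = True
--
--         ## Words in actors' phrases
--         if actor1_On == True and word[0] != actor1:
--             wordList1.append(word)
--         elif actor2_On == True and word[0] != actor2:
--             wordList2.append(word)
--         elif actor3_On == True and word[0] != actor3:
--             wordList3.append(word)
--
--     return wordList1, wordList2, wordList3
-- ===== SOURCE B (Python) =====
-- actor1 = "Niklas_Maak"
--
-- actor2 = "Tony_Fadell"
--
-- actor3 = "Rem_Koolhaas"
--
-- def makeWordListsByActor(words):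
--     # Pass 1: tag each word with the actor currently speaking (None for the
--     # actor-name words themselves and for words before any actor appears).
--     actors = (actor1, actor2, actor3)
--     speakers = []
--     cur = None
--     for word in words:
--         if word[0] in actors:
--             cur = word[0]
--             speakers.append(None)
--         else:
--             speakers.append(cur)
--     # Pass 2: one filter per actor, preserving order.
--     out = tuple([w for w, s in zip(words, speakers) if s == a] for a in actors)
--     return out
-- ===== Notes on version B (the rewrite author's own statement) =====
-- stated objective: simpler
-- what changed: Replaces the three-boolean in-loop state machine with a two-phase design: one scan tags every word with the current speaker (None for the name words), then the three lists are plain order-preserving filters of the tagged words; correctness rests on the tags, not on mutually-exclusive flags.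
import Mathlib
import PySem

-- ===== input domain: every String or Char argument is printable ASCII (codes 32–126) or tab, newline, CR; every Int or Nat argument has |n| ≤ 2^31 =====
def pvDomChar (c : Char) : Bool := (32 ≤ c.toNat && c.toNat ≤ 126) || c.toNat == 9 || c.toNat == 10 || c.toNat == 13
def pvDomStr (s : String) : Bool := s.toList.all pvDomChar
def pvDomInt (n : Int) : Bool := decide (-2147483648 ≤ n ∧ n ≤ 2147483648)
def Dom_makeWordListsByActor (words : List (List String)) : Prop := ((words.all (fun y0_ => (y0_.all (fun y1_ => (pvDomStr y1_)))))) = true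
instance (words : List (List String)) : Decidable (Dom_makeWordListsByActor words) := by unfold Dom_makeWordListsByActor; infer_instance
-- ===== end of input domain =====

-- B replaces A's three-boolean state machine by a two-phase design (speaker tags, then
-- three order-preserving filters); objective: simpler. Equivalence proved on Pre_
-- (no empty inner word, where Python's word[0] raises IndexError in both programs).


-- ===== PORT A =====
def pvActor1 : String := "Niklas_Maak"
def pvActor2 : String := "Tony_Fadell"
def pvActor3 : String := "Rem_Koolhaas"

-- A's loop, step for step: the three accumulating lists and the three booleans.
-- On an empty word Python's word[0] raises IndexError (excluded by Pre_); the port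
-- returns the lists accumulated so far there.
def pvA_loop (words : List (List String)) (l1 l2 l3 : List (List String))
    (a1 a2 a3 : Bool) : List (List String) × List (List String) × List (List String) :=
  match words with
  | [] => (l1, l2, l3)
  | w :: rest =>
    match PySem.List.pyGet? w 0 with
    | none => (l1, l2, l3)
    | some w0 =>
      let st : Bool × Bool × Bool :=
        if w0 = pvActor1 then (true, false, false)
        else if w0 = pvActor2 then (false, true, false)
        else if w0 = pvActor3 then (false, false, true)
        else (a1, a2, a3)
      let a1' := st.1; let a2' := st.2.1; let a3' := st.2.2
      if a1' = true ∧ w0 ≠ pvActor1 then pvA_loop rest (l1 ++ [w]) l2 l3 a1' a2' a3'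
      else if a2' = true ∧ w0 ≠ pvActor2 then pvA_loop rest l1 (l2 ++ [w]) l3 a1' a2' a3'
      else if a3' = true ∧ w0 ≠ pvActor3 then pvA_loop rest l1 l2 (l3 ++ [w]) a1' a2' a3'
      else pvA_loop rest l1 l2 l3 a1' a2' a3'

def makeWordListsByActor (words : List (List String)) :
    List (List String) × List (List String) × List (List String) :=
  pvA_loop words [] [] [] false false false

-- ===== PORT B =====
-- Pass 1 of Source B: tag each word with the current speaker (none for name words and
-- before any actor appears); on an empty word Python raises (excluded by Pre_),
-- the port stops tagging there.
def pvTags (words : List (List String)) (cur : Option String) : List (Option String) :=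
  match words with
  | [] => []
  | w :: rest =>
    match PySem.List.pyGet? w 0 with
    | none => []
    | some w0 =>
      if w0 = pvActor1 ∨ w0 = pvActor2 ∨ w0 = pvActor3 then
        none :: pvTags rest (some w0)
      else
        (cur : Option String) :: pvTags rest cur

-- Pass 2 of Source B: one order-preserving filter per actor over the tagged words.
def pvSel (words : List (List String)) (speakers : List (Option String)) (a : String) :
    List (List String) :=
  ((words.zip speakers).filter (fun p => p.2 == some a)).map Prod.fst

def makeWordListsByActor_alt (words : List (List String)) :
    List (List String) × List (List String) × List (List String) :=
  let speakers := pvTags words none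
  (pvSel words speakers pvActor1, pvSel words speakers pvActor2, pvSel words speakers pvActor3)

-- ===== PRECONDITION & SPEC =====
-- Pre_ excludes inputs containing an empty inner list: there Python's word[0]
-- raises IndexError (in A and in B alike).
def Pre_makeWordListsByActor (words : List (List String)) : Prop :=
  ∀ w ∈ words, w ≠ []
instance (words : List (List String)) : Decidable (Pre_makeWordListsByActor words) := by
  unfold Pre_makeWordListsByActor; infer_instance

def pvWitness_makeWordListsByActor : List (List String) :=
  [["Niklas_Maak"], ["hello"], ["Tony_Fadell"], ["world"]]

def Spec_makeWordListsByActor (words : List (List String)) (out : List (List String) × List (List String) × List (List String)) : Prop := out = makeWordListsByActor_alt words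
instance (words : List (List String)) (out : List (List String) × List (List String) × List (List String)) : Decidable (Spec_makeWordListsByActor words out) := by unfold Spec_makeWordListsByActor; infer_instance

-- ===== CLAIM (what is proved, stated in full; the proofs are below) =====
def Claim_equal_makeWordListsByActor : Prop := ∀ (words : List (List String)), Dom_makeWordListsByActor words → Pre_makeWordListsByActor words → Spec_makeWordListsByActor words (makeWordListsByActor words)

-- ===== LEMMAS AND PROOFS =====

-- decode a current-speaker state into A's three booleans
def pvFlag (cur : Option String) (a : String) : Bool := cur == some a

def pvOkCur (cur : Option String) : Prop :=
  cur = none ∨ cur = some pvActor1 ∨ cur = some pvActor2 ∨ cur = some pvActor3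

lemma pvSel_nil (speakers : List (Option String)) (a : String) :
    pvSel [] speakers a = [] := by
  simp [pvSel]

lemma pvSel_cons (w : List String) (rest : List (List String)) (t : Option String)
    (ts : List (Option String)) (a : String) :
    pvSel (w :: rest) (t :: ts) a =
      (if t == some a then [w] else []) ++ pvSel rest ts a := by
  by_cases h : t == some a <;> simp [pvSel, h]

-- one step of A's loop when the word is an actor's name
lemma pvA_step1 (ws : List String) (rest l1 l2 l3 : List (List String)) (a1 a2 a3 : Bool) :
    pvA_loop ((pvActor1 :: ws) :: rest) l1 l2 l3 a1 a2 a3 =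
      pvA_loop rest l1 l2 l3 true false false := by
  simp [pvA_loop, pvActor1, pvActor2, pvActor3]

lemma pvA_step2 (ws : List String) (rest l1 l2 l3 : List (List String)) (a1 a2 a3 : Bool) :
    pvA_loop ((pvActor2 :: ws) :: rest) l1 l2 l3 a1 a2 a3 =
      pvA_loop rest l1 l2 l3 false true false := by
  simp [pvA_loop, pvActor1, pvActor2, pvActor3]

lemma pvA_step3 (ws : List String) (rest l1 l2 l3 : List (List String)) (a1 a2 a3 : Bool) :
    pvA_loop ((pvActor3 :: ws) :: rest) l1 l2 l3 a1 a2 a3 =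
      pvA_loop rest l1 l2 l3 false false true := by
  simp [pvA_loop, pvActor1, pvActor2, pvActor3]

-- one step of A's loop on an ordinary word
lemma pvA_stepO (w0 : String) (ws : List String) (rest l1 l2 l3 : List (List String))
    (a1 a2 a3 : Bool) (h1 : w0 ≠ pvActor1) (h2 : w0 ≠ pvActor2) (h3 : w0 ≠ pvActor3) :
    pvA_loop ((w0 :: ws) :: rest) l1 l2 l3 a1 a2 a3 =
      pvA_loop rest (if a1 then l1 ++ [w0 :: ws] else l1)
        (if !a1 && a2 then l2 ++ [w0 :: ws] else l2)
        (if !a1 && !a2 && a3 then l3 ++ [w0 :: ws] else l3) a1 a2 a3 := by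
  cases a1 <;> cases a2 <;> cases a3 <;> simp [pvA_loop, h1, h2, h3]

-- one step of B's tagging pass
lemma pvTags_stepA (w0 : String) (ws : List String) (rest : List (List String))
    (cur : Option String) (h : w0 = pvActor1 ∨ w0 = pvActor2 ∨ w0 = pvActor3) :
    pvTags ((w0 :: ws) :: rest) cur = none :: pvTags rest (some w0) := by
  simp [pvTags, h]

lemma pvTags_stepO (w0 : String) (ws : List String) (rest : List (List String))
    (cur : Option String) (h1 : w0 ≠ pvActor1) (h2 : w0 ≠ pvActor2) (h3 : w0 ≠ pvActor3) :
    pvTags ((w0 :: ws) :: rest) cur = cur :: pvTags rest cur := by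
  simp [pvTags, h1, h2, h3]

-- Main invariant: A's loop started in a state decoded from a legitimate current
-- speaker equals the already-accumulated lists followed by B's filters of the tags.
lemma pvA_loop_eq (words : List (List String)) (h : ∀ w ∈ words, w ≠ [])
    (l1 l2 l3 : List (List String)) (cur : Option String) (hcur : pvOkCur cur) :
    pvA_loop words l1 l2 l3 (pvFlag cur pvActor1) (pvFlag cur pvActor2) (pvFlag cur pvActor3) =
      (l1 ++ pvSel words (pvTags words cur) pvActor1,
       l2 ++ pvSel words (pvTags words cur) pvActor2,
       l3 ++ pvSel words (pvTags words cur) pvActor3) := by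
  induction words generalizing l1 l2 l3 cur with
  | nil => simp [pvA_loop, pvTags, pvSel_nil]
  | cons w rest ih =>
    have hw : w ≠ [] := h w (List.mem_cons_self)
    have hrest : ∀ x ∈ rest, x ≠ [] := fun x hx => h x (List.mem_cons_of_mem _ hx)
    obtain ⟨w0, ws, rfl⟩ : ∃ w0 ws, w = w0 :: ws := by
      cases w with
      | nil => exact absurd rfl hw
      | cons a b => exact ⟨a, b, rfl⟩
    by_cases h1 : w0 = pvActor1
    · subst h1
      rw [pvA_step1, pvTags_stepA _ _ _ _ (Or.inl rfl)]
      have ih1 := ih hrest l1 l2 l3 (some pvActor1) (Or.inr (Or.inl rfl))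
      rw [show pvFlag (some pvActor1) pvActor1 = true from by decide,
          show pvFlag (some pvActor1) pvActor2 = false from by decide,
          show pvFlag (some pvActor1) pvActor3 = false from by decide] at ih1
      rw [ih1]; simp [pvSel_cons]
    · by_cases h2 : w0 = pvActor2
      · subst h2
        rw [pvA_step2, pvTags_stepA _ _ _ _ (Or.inr (Or.inl rfl))]
        have ih1 := ih hrest l1 l2 l3 (some pvActor2) (Or.inr (Or.inr (Or.inl rfl)))
        rw [show pvFlag (some pvActor2) pvActor1 = false from by decide,
            show pvFlag (some pvActor2) pvActor2 = true from by decide,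
            show pvFlag (some pvActor2) pvActor3 = false from by decide] at ih1
        rw [ih1]; simp [pvSel_cons]
      · by_cases h3 : w0 = pvActor3
        · subst h3
          rw [pvA_step3, pvTags_stepA _ _ _ _ (Or.inr (Or.inr rfl))]
          have ih1 := ih hrest l1 l2 l3 (some pvActor3) (Or.inr (Or.inr (Or.inr rfl)))
          rw [show pvFlag (some pvActor3) pvActor1 = false from by decide,
              show pvFlag (some pvActor3) pvActor2 = false from by decide,
              show pvFlag (some pvActor3) pvActor3 = true from by decide] at ih1
          rw [ih1]; simp [pvSel_cons]
        · rw [pvA_stepO _ _ _ _ _ _ _ _ _ h1 h2 h3, pvTags_stepO _ _ _ _ h1 h2 h3]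
          rcases hcur with rfl | rfl | rfl | rfl
          · rw [ih hrest _ _ _ none (Or.inl rfl)]
            simp [pvSel_cons, pvFlag]
          · have ih1 := ih hrest (l1 ++ [w0 :: ws]) l2 l3 (some pvActor1) (Or.inr (Or.inl rfl))
            rw [show pvFlag (some pvActor1) pvActor1 = true from by decide,
                show pvFlag (some pvActor1) pvActor2 = false from by decide,
                show pvFlag (some pvActor1) pvActor3 = false from by decide] at ih1 ⊢
            norm_num
            rw [ih1]
            simp [pvSel_cons, show ((some pvActor1 == some pvActor2) : Bool) = false from by decide,
              show ((some pvActor1 == some pvActor3) : Bool) = false from by decide]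
          · have ih1 := ih hrest l1 (l2 ++ [w0 :: ws]) l3 (some pvActor2) (Or.inr (Or.inr (Or.inl rfl)))
            rw [show pvFlag (some pvActor2) pvActor1 = false from by decide,
                show pvFlag (some pvActor2) pvActor2 = true from by decide,
                show pvFlag (some pvActor2) pvActor3 = false from by decide] at ih1 ⊢
            norm_num
            rw [ih1]
            simp [pvSel_cons, show ((some pvActor2 == some pvActor1) : Bool) = false from by decide,
              show ((some pvActor2 == some pvActor3) : Bool) = false from by decide]
          · have ih1 := ih hrest l1 l2 (l3 ++ [w0 :: ws]) (some pvActor3) (Or.inr (Or.inr (Or.inr rfl)))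
            rw [show pvFlag (some pvActor3) pvActor1 = false from by decide,
                show pvFlag (some pvActor3) pvActor2 = false from by decide,
                show pvFlag (some pvActor3) pvActor3 = true from by decide] at ih1 ⊢
            norm_num
            rw [ih1]
            simp [pvSel_cons, show ((some pvActor3 == some pvActor1) : Bool) = false from by decide,
              show ((some pvActor3 == some pvActor2) : Bool) = false from by decide]

-- ===== VERDICT (by name: the statement is the Claim_ definition above) =====
theorem makeWordListsByActor_spec : Claim_equal_makeWordListsByActor := by
  intro words _hdom hpre
  unfold Spec_makeWordListsByActor makeWordListsByActor makeWordListsByActor_alt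
  have := pvA_loop_eq words hpre [] [] [] none (Or.inl rfl)
  simpa [pvFlag] using this
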